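-- pv_equiv track=rewrite | github.com/google-gazzza/algorithm | leetcode/medium/1861-rotating-the-box/1861-rotating-the-box.py | movingStoneToRight
-- ===== SOURCE A (Python) =====
-- from typing import List
--
-- def movingStoneToRight(box: List[List[str]]) -> List[List[str]]:
--     for i in range(len(box)):
--         for j in range(len(box[i]) - 1, -1, -1):
--             if box[i][j] == '#':
--                 k = j
--                 while k + 1 < len(box[i]) and box[i][k + 1] == '.':
--                     box[i][k + 1] = '#'
--                     box[i][k] = '.'
--                     k += 1
--
--     return box
-- ===== SOURCE B (Python) =====
-- from typing import List
--
-- def movingStoneToRight(box: List[List[str]]) -> List[List[str]]: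
--     res = []
--     for row in box:
--         out = []
--         dots = stones = 0
--         for c in row:
--             if c == '.':
--                 dots += 1
--             elif c == '#':
--                 stones += 1
--             else:
--                 out += ['.'] * dots + ['#'] * stones
--                 out.append(c)
--                 dots = stones = 0
--         out += ['.'] * dots + ['#'] * stones
--         res.append(out)
--     return res
-- ===== Notes on version B (the rewrite author's own statement) =====
-- stated objective: alternative
-- what changed: Instead of bubbling each '#' rightward cell by cell from right to left in place, B makes a single left-to-right pass per row counting dots and stones and emits each obstacle-delimited segment as dots-then-stones once, building a fresh result.
import Mathlib
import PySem

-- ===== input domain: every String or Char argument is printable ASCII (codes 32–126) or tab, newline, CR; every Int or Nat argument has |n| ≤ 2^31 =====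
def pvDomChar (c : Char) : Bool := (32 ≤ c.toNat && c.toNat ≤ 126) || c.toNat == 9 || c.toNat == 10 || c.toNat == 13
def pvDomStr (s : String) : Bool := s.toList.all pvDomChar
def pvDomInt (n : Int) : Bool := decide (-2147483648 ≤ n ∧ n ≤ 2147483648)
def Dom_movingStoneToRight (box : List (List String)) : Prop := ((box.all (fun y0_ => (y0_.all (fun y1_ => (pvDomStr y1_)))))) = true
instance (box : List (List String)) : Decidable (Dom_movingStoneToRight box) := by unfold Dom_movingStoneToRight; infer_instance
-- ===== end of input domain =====

-- B replaces A's per-stone rightward bubbling with one per-row pass counting dots/stones per segment.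
-- Python A mutates `box` in place and returns it; B builds a fresh list — the equivalence proved is about the return value.

-- ===== PORT A =====
-- the while-loop: slide the stone at k right while the next cell is '.'
def pvBubbleA (row : List String) (k : Nat) : List String :=
  if k + 1 < row.length ∧ row.getD (k+1) "" == "." then
    pvBubbleA ((row.set (k+1) "#").set k ".") (k+1)
  else row
  termination_by row.length - k
  decreasing_by simp only [List.length_set]; omega

-- the j-loop: j = len-1, …, 0 (indices always in range, so getD is exact)
def pvRowA (row : List String) : List String :=
  List.foldl (fun r j => if r.getD j "" == "#" then pvBubbleA r j else r) row
    (List.range row.length).reverse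

-- the i-loop: row i is rewritten in place
def movingStoneToRight (box : List (List String)) : List (List String) :=
  List.foldl (fun b i => b.set i (pvRowA (b.getD i []))) box (List.range box.length)

-- ===== PORT B =====
def pvRowB (row : List String) : List String :=
  let acc := row.foldl (fun (acc : List String × Nat × Nat) c =>
    if c == "." then (acc.1, acc.2.1 + 1, acc.2.2)
    else if c == "#" then (acc.1, acc.2.1, acc.2.2 + 1)
    else (acc.1 ++ List.replicate acc.2.1 "." ++ List.replicate acc.2.2 "#" ++ [c], 0, 0))
    ([], 0, 0)
  acc.1 ++ List.replicate acc.2.1 "." ++ List.replicate acc.2.2 "#"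

def movingStoneToRight_alt (box : List (List String)) : List (List String) :=
  box.map pvRowB

-- ===== PRECONDITION & SPEC =====
def Spec_movingStoneToRight (box : List (List String)) (out : List (List String)) : Prop := out = movingStoneToRight_alt box
instance (box : List (List String)) (out : List (List String)) : Decidable (Spec_movingStoneToRight box out) := by unfold Spec_movingStoneToRight; infer_instance

-- ===== CLAIM (what is proved, stated in full; the proofs are below) =====
def Claim_equal_movingStoneToRight : Prop := ∀ (box : List (List String)), Dom_movingStoneToRight box → Spec_movingStoneToRight box (movingStoneToRight box)

-- ===== LEMMAS AND PROOFS =====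

-- normal form of a row: every '.'/'#' segment becomes dots-then-stones
def pvPush : List String → List String
  | [] => ["#"]
  | x :: r => if x = "." then "." :: pvPush r else "#" :: x :: r

def pvStep (c : String) (t : List String) : List String :=
  if c = "." then "." :: t else if c = "#" then pvPush t else c :: t

def pvNorm (l : List String) : List String := l.foldr pvStep []

def pvIter : Nat → List String → List String
  | 0, t => t
  | s+1, t => pvIter s (pvPush t)

theorem pvNorm_cons (a : String) (l : List String) : pvNorm (a :: l) = pvStep a (pvNorm l) := rfl

theorem pvNorm_push (t : List String) : pvNorm (pvPush t) = pvPush (pvNorm t) := by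
  induction t with
  | nil => rfl
  | cons x r ih =>
    by_cases hx : x = "."
    · subst hx; simp [pvPush, pvNorm_cons, ih, pvStep]
    · by_cases hx2 : x = "#"
      · subst hx2; simp [pvPush, pvNorm_cons, pvStep]
      · simp [pvPush, hx, pvNorm_cons, pvStep, hx2]

-- generic getD / set / drop through an append prefix
theorem pv_getD_append {α : Type} (pre l : List α) (n : Nat) (d : α) :
    (pre ++ l).getD (pre.length + n) d = l.getD n d := by
  induction pre with
  | nil => simp
  | cons x p ih => simpa [Nat.succ_add] using ih

theorem pv_set_append {α : Type} (pre l : List α) (n : Nat) (x : α) :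
    (pre ++ l).set (pre.length + n) x = pre ++ l.set n x := by
  induction pre with
  | nil => simp
  | cons y p ih => simpa [Nat.succ_add] using ih

theorem pv_drop_append {α : Type} (pre l : List α) (n : Nat) :
    (pre ++ l).drop (pre.length + n) = l.drop n := by
  induction pre with
  | nil => simp
  | cons y p ih => simpa [Nat.succ_add] using ih

-- the while-loop moves the stone across the leading dots of the suffix
theorem pvBubbleA_spec (s pre : List String) :
    pvBubbleA (pre ++ "#" :: s) pre.length = pre ++ pvPush s := by
  induction s generalizing pre with
  | nil =>
    rw [pvBubbleA]
    simp [pvPush]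
  | cons x r ih =>
    by_cases hx : x = "."
    · subst hx
      rw [pvBubbleA]
      have hget : (pre ++ "#" :: "." :: r).getD (pre.length + 1) "" = "." := by
        simpa using pv_getD_append pre ("#" :: "." :: r) 1 ""
      have hlen : pre.length + 1 < (pre ++ "#" :: "." :: r).length := by simp
      rw [if_pos ⟨hlen, by rw [hget]; rfl⟩]
      have hset1 : (pre ++ "#" :: "." :: r).set (pre.length + 1) "#" = pre ++ "#" :: "#" :: r := by
        simpa using pv_set_append pre ("#" :: "." :: r) 1 "#"
      have hset2 : (pre ++ "#" :: "#" :: r).set pre.length "." = pre ++ "." :: "#" :: r := by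
        simpa using pv_set_append pre ("#" :: "#" :: r) 0 "."
      rw [hset1, hset2]
      have h3 : pre ++ "." :: "#" :: r = (pre ++ ["."]) ++ "#" :: r := by simp
      have h4 : pre.length + 1 = (pre ++ ["."]).length := by simp
      rw [h3, h4, ih (pre ++ ["."])]
      simp [pvPush]
    · rw [pvBubbleA]
      have hget : (pre ++ "#" :: x :: r).getD (pre.length + 1) "" = x := by
        simpa using pv_getD_append pre ("#" :: x :: r) 1 ""
      rw [if_neg (by intro hcon; exact hx (by simpa [hget] using hcon.2))]
      simp [pvPush, hx]

-- the j-loop invariant: once the suffix from j is normal, processing 0..j-1 normalises the row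
theorem pvRowA_loop (j : Nat) (c : List String) (hj : j ≤ c.length)
    (hs : pvNorm (c.drop j) = c.drop j) :
    List.foldl (fun r j => if r.getD j "" == "#" then pvBubbleA r j else r) c
      (List.range j).reverse = pvNorm c := by
  induction j generalizing c with
  | zero => simpa using hs.symm
  | succ j ih =>
    have hjlt : j < c.length := by omega
    obtain ⟨x, s, hxs⟩ : ∃ x s, c.drop j = x :: s := by
      cases hdj : c.drop j with
      | nil => exfalso; have := List.drop_eq_nil_iff.mp hdj; omega
      | cons x s => exact ⟨x, s, rfl⟩
    obtain ⟨p, hp, hplen⟩ : ∃ p, c = p ++ x :: s ∧ p.length = j := by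
      refine ⟨c.take j, ?_, by simp [List.length_take]; omega⟩
      conv_lhs => rw [← List.take_append_drop j c, hxs]
    subst hp
    subst hplen
    have hget : (p ++ x :: s).getD p.length "" = x := by
      simpa using pv_getD_append p (x :: s) 0 ""
    have hs' : pvNorm s = s := by
      have hd : (p ++ x :: s).drop (p.length + 1) = s := by
        simpa using pv_drop_append p (x :: s) 1
      rw [hd] at hs; exact hs
    rw [List.range_succ, List.reverse_append]
    simp only [List.reverse_singleton, List.singleton_append, List.foldl_cons]
    by_cases hx : x = "#"
    · subst hx
      rw [if_pos (by rw [hget]; rfl)]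
      rw [pvBubbleA_spec s p]
      have hlen' : p.length ≤ (p ++ pvPush s).length := by simp
      have hdrop' : (p ++ pvPush s).drop p.length = pvPush s := by
        simpa using pv_drop_append p (pvPush s) 0
      rw [ih (p ++ pvPush s) hlen' (by rw [hdrop', pvNorm_push, hs'])]
      rw [pvNorm, pvNorm, List.foldr_append, List.foldr_append]
      show p.foldr pvStep (pvNorm (pvPush s)) = p.foldr pvStep (pvNorm ("#" :: s))
      rw [pvNorm_push, hs', pvNorm_cons, hs',
        show pvStep "#" s = pvPush s by simp [pvStep]]
    · rw [if_neg (by rw [hget]; simp [hx])]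
      apply ih (p ++ x :: s) (by simp)
      have hd : (p ++ x :: s).drop p.length = x :: s := by
        simpa using pv_drop_append p (x :: s) 0
      rw [hd, pvNorm_cons]
      by_cases hxd : x = "."
      · subst hxd; simp [pvStep, hs']
      · simp [pvStep, hxd, hx, hs']

theorem pvRowA_eq_norm (row : List String) : pvRowA row = pvNorm row := by
  apply pvRowA_loop row.length row (le_refl _)
  simp [pvNorm]

-- B side
def pvStepB (acc : List String × Nat × Nat) (c : String) : List String × Nat × Nat :=
  if c == "." then (acc.1, acc.2.1 + 1, acc.2.2)
  else if c == "#" then (acc.1, acc.2.1, acc.2.2 + 1)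
  else (acc.1 ++ List.replicate acc.2.1 "." ++ List.replicate acc.2.2 "#" ++ [c], 0, 0)

theorem pvIter_blocked (s : Nat) (t : List String)
    (h : ∀ x r, t = x :: r → x ≠ ".") : pvIter s t = List.replicate s "#" ++ t := by
  induction s generalizing t with
  | zero => simp [pvIter]
  | succ s ih =>
    have hp : pvPush t = "#" :: t := by
      cases t with
      | nil => rfl
      | cons x r => simp [pvPush, h x r rfl]
    rw [pvIter, hp, ih ("#" :: t) (by intro x r hxr; cases hxr; decide)]
    simp [List.replicate_succ']

theorem pvIter_dot (s : Nat) (t : List String) : pvIter s ("." :: t) = "." :: pvIter s t := by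
  induction s generalizing t with
  | zero => rfl
  | succ s ih => rw [pvIter, pvPush, if_pos rfl, ih, pvIter]

theorem pvRowB_loop (l : List String) (out : List String) (d s : Nat) :
    (l.foldl pvStepB (out, d, s)).1
      ++ List.replicate (l.foldl pvStepB (out, d, s)).2.1 "."
      ++ List.replicate (l.foldl pvStepB (out, d, s)).2.2 "#"
    = out ++ List.replicate d "." ++ pvIter s (pvNorm l) := by
  induction l generalizing out d s with
  | nil =>
    simp only [List.foldl_nil, pvNorm, List.foldr_nil]
    rw [pvIter_blocked s [] (by intro x r h; simp at h)]
    simp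
  | cons c l ih =>
    simp only [List.foldl_cons]
    by_cases hc : c = "."
    · subst hc
      rw [show pvStepB (out, d, s) "." = (out, d + 1, s) by simp [pvStepB]]
      rw [ih, pvNorm_cons]
      rw [show pvStep "." (pvNorm l) = "." :: pvNorm l by simp [pvStep]]
      rw [pvIter_dot]
      simp [List.replicate_succ']
    · by_cases hc2 : c = "#"
      · subst hc2
        rw [show pvStepB (out, d, s) "#" = (out, d, s + 1) by simp [pvStepB]]
        rw [ih, pvNorm_cons]
        show _ = out ++ List.replicate d "." ++ pvIter s (pvStep "#" (pvNorm l))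
        rw [show pvStep "#" (pvNorm l) = pvPush (pvNorm l) by simp [pvStep]]
        rfl
      · rw [show pvStepB (out, d, s) c
            = (out ++ List.replicate d "." ++ List.replicate s "#" ++ [c], 0, 0) by
          simp [pvStepB, hc, hc2]]
        rw [ih, pvNorm_cons]
        rw [show pvStep c (pvNorm l) = c :: pvNorm l by simp [pvStep, hc, hc2]]
        rw [pvIter_blocked s (c :: pvNorm l) (by intro x r h; cases h; exact hc)]
        simp [pvIter]

theorem pvRowB_eq_norm (row : List String) : pvRowB row = pvNorm row := by
  have hf : (fun (acc : List String × Nat × Nat) c =>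
      if c == "." then (acc.1, acc.2.1 + 1, acc.2.2)
      else if c == "#" then (acc.1, acc.2.1, acc.2.2 + 1)
      else (acc.1 ++ List.replicate acc.2.1 "." ++ List.replicate acc.2.2 "#" ++ [c], 0, 0))
      = pvStepB := rfl
  have h := pvRowB_loop row [] 0 0
  simp only [pvIter, List.replicate, List.nil_append] at h
  rw [pvRowB, hf]
  exact h

-- outer loop: setting each row i to f(row i) is map f
theorem pv_outer (f : List String → List String) (suf pre : List (List String)) :
    List.foldl (fun b i => b.set i (f (b.getD i []))) (pre ++ suf)
      (List.range' pre.length suf.length) = pre ++ suf.map f := by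
  induction suf generalizing pre with
  | nil => simp
  | cons r rs ih =>
    rw [List.length_cons, List.range'_succ, List.foldl_cons]
    have hget : (pre ++ r :: rs).getD pre.length [] = r := by
      simpa using pv_getD_append pre (r :: rs) 0 []
    have hset : (pre ++ r :: rs).set pre.length (f r) = pre ++ f r :: rs := by
      simpa using pv_set_append pre (r :: rs) 0 (f r)
    rw [hget, hset]
    have h1 : pre ++ f r :: rs = (pre ++ [f r]) ++ rs := by simp
    have h2 : pre.length + 1 = (pre ++ [f r]).length := by simp
    rw [h1, h2, ih (pre ++ [f r])]
    simp

-- ===== VERDICT (by name: the statement is the Claim_ definition above) =====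
theorem movingStoneToRight_spec : Claim_equal_movingStoneToRight := by
  intro box _
  unfold Spec_movingStoneToRight movingStoneToRight movingStoneToRight_alt
  rw [List.range_eq_range']
  have h := pv_outer pvRowA box []
  simp only [List.nil_append, List.length_nil] at h
  rw [h]
  apply List.map_congr_left
  intro r _
  rw [pvRowA_eq_norm, ← pvRowB_eq_norm]
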